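-- pv_equiv track=rewrite | github.com/vindeiatrix/mutants3 | scripts/monsters_initial_spawn.py | _generate_positions
-- ===== SOURCE A (Python) =====
-- from collections.abc import Iterable
-- from typing import Any, Dict, Iterable as TypingIterable, List, Sequence, Tuple
--
-- def _generate_positions(center_x: int, center_y: int, radius: int) -> Iterable[Tuple[int, int]]:
--     candidates: list[Tuple[int, int, int]] = []
--     for dx in range(-radius, radius + 1):
--         for dy in range(-radius, radius + 1):
--             distance = abs(dx) + abs(dy)
--             if distance > radius:
--                 continue
--             candidates.append((distance, center_x + dx, center_y + dy))
--     candidates.sort(key=lambda entry: (entry[0], entry[1], entry[2]))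
--     for _, x, y in candidates:
--         yield x, y
-- ===== SOURCE B (Python) =====
-- def _generate_positions(center_x, center_y, radius):
--     # Stream the points directly in (distance, x, y) order: distance shells
--     # outward, x left-to-right within a shell, smaller y before larger y.
--     for d in range(0, radius + 1):
--         for x in range(center_x - d, center_x + d + 1):
--             rem = d - abs(x - center_x)
--             yield x, center_y - rem
--             if rem > 0:
--                 yield x, center_y + rem
-- ===== Notes on version B (the rewrite author's own statement) =====
-- stated objective: faster
-- what changed: B enumerates the points directly in output order (distance shell, then x, then y) and streams them instead of collecting, filtering and sorting all square candidates; intended as faster by dropping the O(R^2 log R) sort - measured 6.5x at the largest size both finished (n=256), unconfirmed at n=1024 where both time out producing the ~4M-point output.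
import Mathlib
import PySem

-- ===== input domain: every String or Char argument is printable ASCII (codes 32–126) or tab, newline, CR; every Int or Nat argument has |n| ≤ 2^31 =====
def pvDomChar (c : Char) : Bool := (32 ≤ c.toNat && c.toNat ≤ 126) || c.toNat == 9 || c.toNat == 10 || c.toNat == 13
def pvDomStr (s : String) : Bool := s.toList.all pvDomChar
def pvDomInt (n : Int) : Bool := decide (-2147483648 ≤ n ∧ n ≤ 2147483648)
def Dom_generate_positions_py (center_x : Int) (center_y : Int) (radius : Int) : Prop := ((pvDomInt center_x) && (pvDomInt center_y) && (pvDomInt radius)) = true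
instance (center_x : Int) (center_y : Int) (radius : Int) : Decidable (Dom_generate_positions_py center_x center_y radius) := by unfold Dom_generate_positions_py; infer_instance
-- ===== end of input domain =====

-- B streams the points directly in (distance, x, y) order instead of A's collect-filter-sort;
-- return value only (both Pythons are generators, compared as the sequence of yielded pairs).

-- ===== PORT A =====
-- sort key: Python's tuple (entry[0], entry[1], entry[2]) compares lexicographically; exact via toLex
def pvKey3 (t : Int × Int × Int) : Lex (Int × Lex (Int × Int)) := toLex (t.1, toLex (t.2.1, t.2.2))

def generate_positions_py (center_x : Int) (center_y : Int) (radius : Int) : List (Int × Int) :=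
  let candidates : List (Int × Int × Int) :=
    (PySem.List.pyRange (-radius) (radius + 1) 1).foldl (fun acc dx =>
      (PySem.List.pyRange (-radius) (radius + 1) 1).foldl (fun acc2 dy =>
        let distance := |dx| + |dy|
        if distance > radius then acc2
        else acc2 ++ [(distance, center_x + dx, center_y + dy)]) acc) []
  let candidates := PySem.List.sorted candidates pvKey3 false
  candidates.map (fun t => (t.2.1, t.2.2))

-- ===== PORT B =====
def generate_positions_py_alt (center_x : Int) (center_y : Int) (radius : Int) : List (Int × Int) :=
  (PySem.List.pyRange 0 (radius + 1) 1).flatMap (fun d =>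
    (PySem.List.pyRange (center_x - d) (center_x + d + 1) 1).flatMap (fun x =>
      let rem := d - |x - center_x|
      (x, center_y - rem) :: (if rem > 0 then [(x, center_y + rem)] else [])))

-- ===== PRECONDITION & SPEC =====
def Spec_generate_positions_py (center_x : Int) (center_y : Int) (radius : Int) (out : List (Int × Int)) : Prop := out = generate_positions_py_alt center_x center_y radius
instance (center_x : Int) (center_y : Int) (radius : Int) (out : List (Int × Int)) : Decidable (Spec_generate_positions_py center_x center_y radius out) := by unfold Spec_generate_positions_py; infer_instance

-- ===== CLAIM (what is proved, stated in full; the proofs are below) =====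
def Claim_equal_generate_positions_py : Prop := ∀ (center_x : Int) (center_y : Int) (radius : Int), Dom_generate_positions_py center_x center_y radius → Spec_generate_positions_py center_x center_y radius (generate_positions_py center_x center_y radius)

-- ===== LEMMAS AND PROOFS =====

-- B's output, annotated with the distance of each point (first component).
def pvShells (center_x : Int) (center_y : Int) (radius : Int) : List (Int × Int × Int) :=
  (PySem.List.pyRange 0 (radius + 1) 1).flatMap (fun d =>
    (PySem.List.pyRange (center_x - d) (center_x + d + 1) 1).flatMap (fun x =>
      let rem := d - |x - center_x|
      (d, x, center_y - rem) :: (if rem > 0 then [(d, x, center_y + rem)] else [])))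

-- A's candidate list as a flatMap.
def pvCands (center_x : Int) (center_y : Int) (radius : Int) : List (Int × Int × Int) :=
  (PySem.List.pyRange (-radius) (radius + 1) 1).flatMap (fun dx =>
    (PySem.List.pyRange (-radius) (radius + 1) 1).flatMap (fun dy =>
      if |dx| + |dy| > radius then []
      else [(|dx| + |dy|, center_x + dx, center_y + dy)]))

lemma pvKey3_lt_iff (a b : Int × Int × Int) :
    pvKey3 a < pvKey3 b ↔
      a.1 < b.1 ∨ (a.1 = b.1 ∧ (a.2.1 < b.2.1 ∨ (a.2.1 = b.2.1 ∧ a.2.2 < b.2.2))) := by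
  simp [pvKey3, Prod.Lex.toLex_lt_toLex]

lemma pvCands_eq (cx cy r : Int) :
    ((PySem.List.pyRange (-r) (r + 1) 1).foldl (fun acc dx =>
      (PySem.List.pyRange (-r) (r + 1) 1).foldl (fun acc2 dy =>
        let distance := |dx| + |dy|
        if distance > r then acc2
        else acc2 ++ [(distance, cx + dx, cy + dy)]) acc) []) = pvCands cx cy r := by
  unfold pvCands
  have hin : ∀ (acc : List (Int × Int × Int)) (dx : Int), dx ∈ PySem.List.pyRange (-r) (r + 1) 1 →
      ((PySem.List.pyRange (-r) (r + 1) 1).foldl (fun acc2 dy =>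
        let distance := |dx| + |dy|
        if distance > r then acc2
        else acc2 ++ [(distance, cx + dx, cy + dy)]) acc) =
      acc ++ (PySem.List.pyRange (-r) (r + 1) 1).flatMap (fun dy =>
        if |dx| + |dy| > r then [] else [(|dx| + |dy|, cx + dx, cy + dy)]) := by
    intro acc dx _
    rw [← PySem.List.foldl_append_eq_flatMap]
    apply PySem.List.foldl_congr_mem
    intro acc2 dy _
    dsimp only
    split <;> simp
  rw [PySem.List.foldl_congr_mem _ _ _ _ hin, PySem.List.foldl_append_eq_flatMap]
  simp

lemma mem_pvCands (cx cy r : Int) (t : Int × Int × Int) :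
    t ∈ pvCands cx cy r ↔
      t.1 = |t.2.1 - cx| + |t.2.2 - cy| ∧ t.1 ≤ r := by
  obtain ⟨d, x, y⟩ := t
  simp only [pvCands, List.mem_flatMap, PySem.List.mem_pyRange_one]
  constructor
  · rintro ⟨dx, ⟨h1, h2⟩, dy, ⟨h3, h4⟩, h5⟩
    split at h5
    · simp at h5
    · simp only [List.mem_singleton, Prod.mk.injEq] at h5
      obtain ⟨e1, e2, e3⟩ := h5
      subst e1 e2 e3
      constructor
      · congr 1 <;> congr 1 <;> omega
      · omega
  · rintro ⟨h1, h2⟩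
    refine ⟨x - cx, ?_, y - cy, ?_, ?_⟩
    · simp only [Int.abs_eq_natAbs] at *; omega
    · simp only [Int.abs_eq_natAbs] at *; omega
    · have : ¬ (|x - cx| + |y - cy| > r) := by omega
      rw [if_neg this]
      simp only [List.mem_singleton, Prod.mk.injEq]
      refine ⟨by omega, by ring, by ring⟩

lemma mem_pvShells (cx cy r : Int) (t : Int × Int × Int) :
    t ∈ pvShells cx cy r ↔
      t.1 = |t.2.1 - cx| + |t.2.2 - cy| ∧ t.1 ≤ r := by
  obtain ⟨d, x, y⟩ := t
  simp only [pvShells, List.mem_flatMap, PySem.List.mem_pyRange_one, List.mem_cons]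
  constructor
  · rintro ⟨e, ⟨h1, h2⟩, x', ⟨h3, h4⟩, h5⟩
    have habs : |x' - cx| ≤ e := abs_le.mpr ⟨by omega, by omega⟩
    rcases h5 with h5 | h5
    · simp only [Prod.mk.injEq] at h5
      obtain ⟨e1, e2, e3⟩ := h5
      subst e1 e2 e3
      have hy : |cy - (d - |x - cx|) - cy| = d - |x - cx| := by
        rw [show cy - (d - |x - cx|) - cy = -(d - |x - cx|) by ring, abs_neg,
          abs_of_nonneg (by linarith)]
      rw [hy]
      exact ⟨by ring, by omega⟩
    · split at h5
      · simp only [List.mem_singleton, Prod.mk.injEq] at h5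
        obtain ⟨e1, e2, e3⟩ := h5
        subst e1 e2 e3
        have hy : |cy + (d - |x - cx|) - cy| = d - |x - cx| := by
          rw [show cy + (d - |x - cx|) - cy = d - |x - cx| by ring,
            abs_of_nonneg (by linarith)]
        rw [hy]
        exact ⟨by ring, by omega⟩
      · simp at h5
  · rintro ⟨h1, h2⟩
    have hx1 : x - cx ≤ |x - cx| := le_abs_self _
    have hx2 : -(x - cx) ≤ |x - cx| := neg_le_abs _
    have hy0 : (0:Int) ≤ |y - cy| := abs_nonneg _
    have hx0 : (0:Int) ≤ |x - cx| := abs_nonneg _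
    refine ⟨d, ⟨by linarith, by linarith⟩, x, ⟨by linarith, by linarith⟩, ?_⟩
    rcases le_or_gt y cy with hy | hy
    · left
      have : |y - cy| = -(y - cy) := abs_of_nonpos (by linarith)
      simp only [Prod.mk.injEq]
      exact ⟨trivial, trivial, by linarith⟩
    · right
      have h' : |y - cy| = y - cy := abs_of_nonneg (by linarith)
      rw [if_pos (by linarith)]
      simp only [List.mem_singleton, Prod.mk.injEq]
      exact ⟨trivial, trivial, by linarith⟩

lemma pvCandsBlock_shape (cx cy r dx dy : Int) (t : Int × Int × Int)
    (h : t ∈ (if |dx| + |dy| > r then ([] : List (Int × Int × Int))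
      else [(|dx| + |dy|, cx + dx, cy + dy)])) :
    t = (|dx| + |dy|, cx + dx, cy + dy) := by
  split at h
  · exact absurd h (List.not_mem_nil)
  · simpa using h

lemma nodup_pvCands (cx cy r : Int) : (pvCands cx cy r).Nodup := by
  unfold pvCands
  rw [List.nodup_flatMap]
  constructor
  · intro dx _
    rw [List.nodup_flatMap]
    constructor
    · intro dy _
      split <;> simp
    · apply List.Pairwise.imp ?_ (PySem.List.nodup_pyRange_one (a := -r) (b := r + 1))
      intro dy1 dy2 hne t h1 h2
      have e1 := pvCandsBlock_shape cx cy r dx dy1 t h1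
      have e2 := pvCandsBlock_shape cx cy r dx dy2 t h2
      rw [e1] at e2
      simp only [Prod.mk.injEq] at e2
      omega
  · apply List.Pairwise.imp ?_ (PySem.List.nodup_pyRange_one (a := -r) (b := r + 1))
    intro dx1 dx2 hne t h1 h2
    simp only [List.mem_flatMap] at h1 h2
    obtain ⟨dy1, -, h1⟩ := h1
    obtain ⟨dy2, -, h2⟩ := h2
    have e1 := pvCandsBlock_shape cx cy r dx1 dy1 t h1
    have e2 := pvCandsBlock_shape cx cy r dx2 dy2 t h2
    rw [e1] at e2
    simp only [Prod.mk.injEq] at e2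
    omega

-- every element of the inner block of pvShells carries its (d, x) in the first two slots
lemma pvBlock_shape (cx cy d x : Int) (t : Int × Int × Int)
    (h : t ∈ (d, x, cy - (d - |x - cx|)) ::
      (if d - |x - cx| > 0 then [(d, x, cy + (d - |x - cx|))] else [])) :
    t.1 = d ∧ t.2.1 = x := by
  rw [List.mem_cons] at h
  rcases h with h | h
  · subst h; exact ⟨rfl, rfl⟩
  · split at h
    · simp only [List.mem_singleton] at h; subst h; exact ⟨rfl, rfl⟩
    · exact absurd h (List.not_mem_nil)

lemma nodup_pvShells (cx cy r : Int) : (pvShells cx cy r).Nodup := by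
  unfold pvShells
  rw [List.nodup_flatMap]
  constructor
  · intro d _
    rw [List.nodup_flatMap]
    constructor
    · intro x _
      dsimp only
      split
      · rename_i hrem
        simp only [List.nodup_cons, List.mem_singleton, Prod.mk.injEq]
        refine ⟨fun hc => ?_, by simp, by simp⟩
        obtain ⟨-, -, hc⟩ := hc
        linarith
      · simp
    · apply List.Pairwise.imp ?_ (PySem.List.nodup_pyRange_one (a := cx - d) (b := cx + d + 1))
      intro x1 x2 hne t h1 h2
      have := pvBlock_shape cx cy d x1 t h1
      have := pvBlock_shape cx cy d x2 t h2
      omega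
  · apply List.Pairwise.imp ?_ (PySem.List.nodup_pyRange_one (a := 0) (b := r + 1))
    intro d1 d2 hne t h1 h2
    simp only [List.mem_flatMap] at h1 h2
    obtain ⟨x1, -, h1⟩ := h1
    obtain ⟨x2, -, h2⟩ := h2
    have := pvBlock_shape cx cy d1 x1 t h1
    have := pvBlock_shape cx cy d2 x2 t h2
    omega

lemma pairwise_pvShells (cx cy r : Int) :
    (pvShells cx cy r).Pairwise (fun a b => pvKey3 a < pvKey3 b) := by
  unfold pvShells
  rw [List.pairwise_flatMap]
  constructor
  · intro d _
    rw [List.pairwise_flatMap]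
    constructor
    · intro x _
      dsimp only
      split
      · rename_i hrem
        simp only [List.pairwise_cons, List.mem_singleton, forall_eq, pvKey3_lt_iff]
        refine ⟨Or.inr ⟨trivial, Or.inr ⟨trivial, by linarith⟩⟩, by simp, by simp⟩
      · simp
    · apply List.Pairwise.imp ?_ (PySem.List.pairwise_lt_pyRange_one (a := cx - d) (b := cx + d + 1))
      intro x1 x2 hlt t1 h1 t2 h2
      have s1 := pvBlock_shape cx cy d x1 t1 h1
      have s2 := pvBlock_shape cx cy d x2 t2 h2
      rw [pvKey3_lt_iff]
      exact Or.inr ⟨by omega, Or.inl (by omega)⟩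
  · apply List.Pairwise.imp ?_ (PySem.List.pairwise_lt_pyRange_one (a := 0) (b := r + 1))
    intro d1 d2 hlt t1 h1 t2 h2
    simp only [List.mem_flatMap] at h1 h2
    obtain ⟨x1, -, h1⟩ := h1
    obtain ⟨x2, -, h2⟩ := h2
    have s1 := pvBlock_shape cx cy d1 x1 t1 h1
    have s2 := pvBlock_shape cx cy d2 x2 t2 h2
    rw [pvKey3_lt_iff]
    exact Or.inl (by omega)

lemma sorted_cands_eq_shells (cx cy r : Int) :
    PySem.List.sorted (pvCands cx cy r) pvKey3 false = pvShells cx cy r := by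
  apply PySem.List.sorted_eq_of_perm_of_pairwise_lt
  · rw [List.perm_ext_iff_of_nodup (nodup_pvShells cx cy r) (nodup_pvCands cx cy r)]
    intro a; rw [mem_pvShells, mem_pvCands]
  · exact pairwise_pvShells cx cy r

lemma map_pvShells (cx cy r : Int) :
    (pvShells cx cy r).map (fun t => (t.2.1, t.2.2)) = generate_positions_py_alt cx cy r := by
  unfold pvShells generate_positions_py_alt
  simp only [List.map_flatMap]
  apply List.flatMap_congr
  intro d _
  apply List.flatMap_congr
  intro x _
  dsimp only
  split <;> simp

-- ===== VERDICT (by name: the statement is the Claim_ definition above) =====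
theorem generate_positions_py_spec : Claim_equal_generate_positions_py := by
  intro cx cy r _
  show generate_positions_py cx cy r = generate_positions_py_alt cx cy r
  simp only [generate_positions_py, pvCands_eq, sorted_cands_eq_shells, map_pvShells]
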